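-- pv_equiv track=rewrite | github.com/antieau/snforacle | tests/test_pure_python_poly.py | _mat_eq
-- ===== SOURCE A (Python) =====
-- def _poly_eq(a: list[int], b: list[int]) -> bool:
--     """Trim and compare two polynomials."""
--     def trim(x):
--         c = list(x)
--         while c and c[-1] == 0:
--             c.pop()
--         return c
--     return trim(a) == trim(b)
--
-- def _mat_eq(A: list[list[list[int]]], B: list[list[list[int]]]) -> bool:
--     if len(A) != len(B):
--         return False
--     for ra, rb in zip(A, B):
--         if len(ra) != len(rb):
--             return False
--         for pa, pb in zip(ra, rb):
--             if not _poly_eq(pa, pb):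
--                 return False
--     return True
-- ===== SOURCE B (Python) =====
-- def _coef(p, i):
--     """i-th coefficient of the polynomial p, 0 beyond the stored length."""
--     return p[i] if i < len(p) else 0
--
-- def _mat_eq(A, B):
--     # Compare the matrices coefficient-wise under implicit zero extension:
--     # no trimmed copies are ever built.
--     return len(A) == len(B) and all(
--         len(ra) == len(rb) and all(
--             all(_coef(pa, i) == _coef(pb, i)
--                 for i in range(max(len(pa), len(pb))))
--             for pa, pb in zip(ra, rb))
--         for ra, rb in zip(A, B))
-- ===== Notes on version B (the rewrite author's own statement) =====
-- stated objective: alternative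
-- what changed: B never trims: instead of A's normalize-then-compare (strip trailing zeros of each polynomial, then compare lists), B compares each pair of polynomials coefficient-wise under implicit zero extension up to the longer length, so no canonical copies are built and no pops/trims happen.
import Mathlib
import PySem

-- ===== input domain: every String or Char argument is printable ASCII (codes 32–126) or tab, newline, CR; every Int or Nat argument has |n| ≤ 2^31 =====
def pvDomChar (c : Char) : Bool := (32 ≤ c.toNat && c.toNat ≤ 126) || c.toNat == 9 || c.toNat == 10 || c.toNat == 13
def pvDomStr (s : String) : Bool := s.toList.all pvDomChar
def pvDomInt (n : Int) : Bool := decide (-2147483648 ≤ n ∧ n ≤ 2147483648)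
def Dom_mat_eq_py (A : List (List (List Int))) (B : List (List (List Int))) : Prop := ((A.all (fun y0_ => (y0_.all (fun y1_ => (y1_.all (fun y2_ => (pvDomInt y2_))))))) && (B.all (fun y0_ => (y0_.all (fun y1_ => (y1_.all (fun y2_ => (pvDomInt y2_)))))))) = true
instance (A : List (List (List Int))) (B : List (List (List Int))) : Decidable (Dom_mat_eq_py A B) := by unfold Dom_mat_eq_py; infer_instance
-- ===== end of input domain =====

-- B compares each pair of polynomials coefficient-wise under implicit zero extension
-- (p[i] read as 0 beyond the stored length), instead of A's trim-then-compare: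
-- an alternative algorithm that builds no trimmed copies.

-- ===== PORT A =====
-- trim: c = list(x); while c and c[-1] == 0: c.pop(); return c
def trimA (c : List Int) : List Int :=
  match h : c.getLast? with
  | some v => if v == 0 then trimA c.dropLast else c
  | none => c
termination_by c.length
decreasing_by
  have hne : c ≠ [] := by intro hc; rw [hc] at h; simp at h
  have h1 : c.dropLast.length = c.length - 1 := List.length_dropLast
  have h2 : 0 < c.length := List.length_pos_of_ne_nil hne
  omega

def poly_eq (a : List Int) (b : List Int) : Bool := trimA a == trimA b

def mat_eq_py (A : List (List (List Int))) (B : List (List (List Int))) : Bool :=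
  if A.length == B.length then
    (A.zip B).all (fun rab =>
      if rab.1.length == rab.2.length then
        (rab.1.zip rab.2).all (fun pab => poly_eq pab.1 pab.2)
      else false)
  else false

-- ===== PORT B =====
-- _coef(p, i) = p[i] if i < len(p) else 0
def coefB (p : List Int) (i : Nat) : Int := if i < p.length then p.getD i 0 else 0

def mat_eq_py_alt (A : List (List (List Int))) (B : List (List (List Int))) : Bool :=
  decide (A.length = B.length) &&
    (A.zip B).all (fun rab =>
      decide (rab.1.length = rab.2.length) &&
        (rab.1.zip rab.2).all (fun pab =>
          (List.range (max pab.1.length pab.2.length)).all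
            (fun i => coefB pab.1 i == coefB pab.2 i)))

-- ===== PRECONDITION & SPEC =====
def Spec_mat_eq_py (A : List (List (List Int))) (B : List (List (List Int))) (out : Bool) : Prop := out = mat_eq_py_alt A B
instance (A : List (List (List Int))) (B : List (List (List Int))) (out : Bool) : Decidable (Spec_mat_eq_py A B out) := by unfold Spec_mat_eq_py; infer_instance

-- ===== CLAIM (what is proved, stated in full; the proofs are below) =====
def Claim_equal_mat_eq_py : Prop := ∀ (A : List (List (List Int))) (B : List (List (List Int))), Dom_mat_eq_py A B → Spec_mat_eq_py A B (mat_eq_py A B)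

-- ===== LEMMAS AND PROOFS =====

-- the canonical trimmed form
def canon (c : List Int) : List Int := (c.reverse.dropWhile (fun v => v == 0)).reverse

theorem trimA_concat (c : List Int) (a : Int) :
    trimA (c ++ [a]) = if a = 0 then trimA c else c ++ [a] := by
  rw [trimA]
  split
  next v hv =>
    have hva : v = a := by
      rw [List.getLast?_concat] at hv
      exact (Option.some.inj hv).symm
    subst hva
    rw [List.dropLast_concat]
    simp
  next hv =>
    rw [List.getLast?_concat] at hv
    exact absurd hv (by simp)

theorem trimA_eq_canon (c : List Int) : trimA c = canon c := by
  induction c using List.reverseRecOn with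
  | nil => simp [trimA, canon]
  | append_singleton c a ih =>
    rw [trimA_concat]
    simp only [canon, List.reverse_append, List.reverse_singleton,
      List.singleton_append, List.dropWhile_cons]
    by_cases ha : a = 0
    · subst ha
      simpa [canon] using ih
    · simp [ha]

theorem coefB_eq_getD (p : List Int) (i : Nat) : coefB p i = p.getD i 0 := by
  unfold coefB
  split
  · rfl
  · next h => simp [List.getD, List.getElem?_eq_none (by omega : p.length ≤ i)]

theorem canon_getD (c : List Int) (i : Nat) : (canon c).getD i 0 = c.getD i 0 := by
  induction c using List.reverseRecOn with
  | nil => simp [canon]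
  | append_singleton c a ih =>
    by_cases ha : a = 0
    · subst ha
      have hcan : canon (c ++ [(0 : Int)]) = canon c := by
        simp [canon]
      rw [hcan, ih]
      by_cases hi : i < c.length
      · simp [List.getD, List.getElem?_append_left hi]
      · have h1 : c.getD i 0 = 0 := by
          simp [List.getD, List.getElem?_eq_none (by omega : c.length ≤ i)]
        rw [h1]
        by_cases hi2 : i = c.length
        · simp [List.getD, hi2]
        · simp [List.getD,
            List.getElem?_eq_none (by simp; omega : (c ++ [(0:Int)]).length ≤ i)]
    · have hcan : canon (c ++ [a]) = c ++ [a] := by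
        simp [canon, ha]
      rw [hcan]

theorem canon_no_trailing (c : List Int) (v : Int) (h : (canon c).getLast? = some v) :
    v ≠ 0 := by
  unfold canon at h
  rw [List.getLast?_reverse] at h
  have hne : c.reverse.dropWhile (fun v => v == 0) ≠ [] := by
    intro hc; rw [hc] at h; simp at h
  have hh := List.head?_dropWhile_not (fun v => (v : Int) == 0) c.reverse
  rw [h] at hh
  simpa using hh

theorem eq_of_no_trailing_getD (c d : List Int)
    (hc : ∀ v, c.getLast? = some v → v ≠ 0)
    (hd : ∀ v, d.getLast? = some v → v ≠ 0)
    (h : ∀ i, c.getD i 0 = d.getD i 0) : c = d := by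
  have hlast : ∀ (x : List Int), ∀ i, x.length ≤ i → x.getD i 0 = 0 := by
    intro x i hi
    simp [List.getD, List.getElem?_eq_none hi]
  have hgl : ∀ (x : List Int) (hx : x ≠ []), x.getD (x.length - 1) 0 = x.getLast hx := by
    intro x hx
    have hpos := List.length_pos_of_ne_nil hx
    rw [List.getD_eq_getElem _ _ (by omega)]
    exact (List.getLast_eq_getElem hx).symm
  have hlen : c.length = d.length := by
    by_contra hne
    rcases Nat.lt_or_ge c.length d.length with hlt | hge
    · have hdne : d ≠ [] := by intro hd0; subst hd0; simp at hlt
      have hv := hd (d.getLast hdne) (List.getLast?_eq_some_getLast hdne)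
      have hc0 : c.getD (d.length - 1) 0 = 0 := hlast c _ (by omega)
      rw [h (d.length - 1), hgl d hdne] at hc0
      exact hv hc0
    · have hlt : d.length < c.length := by omega
      have hcne : c ≠ [] := by intro hc0; subst hc0; simp at hlt
      have hv := hc (c.getLast hcne) (List.getLast?_eq_some_getLast hcne)
      have hd0 : d.getD (c.length - 1) 0 = 0 := hlast d _ (by omega)
      rw [← h (c.length - 1), hgl c hcne] at hd0
      exact hv hd0
  apply List.ext_getElem hlen
  intro i h1 h2
  have hi := h i
  rwa [List.getD_eq_getElem _ _ h1, List.getD_eq_getElem _ _ h2] at hi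

theorem getD_iff_canon (a b : List Int) :
    (∀ i, a.getD i 0 = b.getD i 0) ↔ canon a = canon b := by
  constructor
  · intro h
    exact eq_of_no_trailing_getD _ _ (canon_no_trailing a) (canon_no_trailing b)
      (fun i => by rw [canon_getD, canon_getD]; exact h i)
  · intro h i
    rw [← canon_getD a, ← canon_getD b, h]

-- B's inner test equals A's trim-then-compare test
theorem pad_eq_poly_eq (a b : List Int) :
    (List.range (max a.length b.length)).all (fun i => coefB a i == coefB b i)
      = poly_eq a b := by
  unfold poly_eq
  rw [trimA_eq_canon, trimA_eq_canon]
  by_cases h : canon a = canon b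
  · simp only [h, BEq.rfl]
    have hp := (getD_iff_canon a b).mpr h
    simp only [List.all_eq_true, List.mem_range]
    intro i _
    rw [coefB_eq_getD, coefB_eq_getD, hp i]
    exact BEq.rfl
  · have hb : (canon a == canon b) = false := by simp [h]
    rw [hb]
    by_contra hall
    have hall' : ∀ i < max a.length b.length, a.getD i 0 = b.getD i 0 := by
      intro i hi
      have := List.all_eq_true.mp (Bool.of_not_eq_false hall) i (List.mem_range.mpr hi)
      simpa [coefB_eq_getD] using this
    apply h
    apply (getD_iff_canon a b).mp
    intro i
    by_cases hi : i < max a.length b.length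
    · exact hall' i hi
    · have h1 : a.getD i 0 = 0 := by
        simp [List.getD, List.getElem?_eq_none (by omega : a.length ≤ i)]
      have h2 : b.getD i 0 = 0 := by
        simp [List.getD, List.getElem?_eq_none (by omega : b.length ≤ i)]
      rw [h1, h2]

theorem if_false_eq_and (c : Prop) [Decidable c] (x : Bool) :
    (if c then x else false) = (decide c && x) := by
  split <;> simp_all

theorem mat_eq_py_spec_aux (A B : List (List (List Int))) :
    mat_eq_py A B = mat_eq_py_alt A B := by
  unfold mat_eq_py mat_eq_py_alt
  simp only [beq_iff_eq, if_false_eq_and]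
  have hfun : ∀ pab : List Int × List Int, poly_eq pab.1 pab.2
      = (List.range (max pab.1.length pab.2.length)).all
          (fun i => coefB pab.1 i == coefB pab.2 i) :=
    fun pab => (pad_eq_poly_eq pab.1 pab.2).symm
  simp only [hfun]

-- ===== VERDICT (by name: the statement is the Claim_ definition above) =====
theorem mat_eq_py_spec : Claim_equal_mat_eq_py := by
  intro A B _
  exact mat_eq_py_spec_aux A B
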